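-- pv_equiv track=rewrite | github.com/TheSuncatcher222/auxiliary_files | algorithms_exercises/find_water_volume.py | count_vol_edge
-- ===== SOURCE A (Python) =====
-- def count_vol_edge(alts: list, max_alt: int, range: range) -> int:
--     """Count water volume on islands edge (before first maximum altitude)."""
--     volume: int = 0
--     for i in range:
--         alt: int = alts[i]
--         if alt < max_alt:
--             volume += max_alt - alt
--         elif alt > max_alt:
--             max_alt = alt
--     return volume
-- ===== SOURCE B (Python) =====
-- def count_vol_edge(alts: list, max_alt: int, range: range) -> int:
--     """Two-pass rewrite: gather the visited values, build the prefix-maximum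
--     table (seeded with max_alt, each entry covering strictly earlier values),
--     then sum the positive gaps in one comprehension."""
--     values = [alts[i] for i in range]
--     prefixes = []
--     m = max_alt
--     for v in values:
--         prefixes.append(m)
--         m = m if m >= v else v
--     return sum(p - v for v, p in zip(values, prefixes) if v < p)
-- ===== Notes on version B (the rewrite author's own statement) =====
-- stated objective: alternative
-- what changed: Replaces A's single stateful loop (volume and running max updated together, branch by branch) by a two-pass decomposition: first materialise the visited values and their seeded prefix-maximum table, then sum the positive gaps in a separate zip/comprehension pass.
import Mathlib
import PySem

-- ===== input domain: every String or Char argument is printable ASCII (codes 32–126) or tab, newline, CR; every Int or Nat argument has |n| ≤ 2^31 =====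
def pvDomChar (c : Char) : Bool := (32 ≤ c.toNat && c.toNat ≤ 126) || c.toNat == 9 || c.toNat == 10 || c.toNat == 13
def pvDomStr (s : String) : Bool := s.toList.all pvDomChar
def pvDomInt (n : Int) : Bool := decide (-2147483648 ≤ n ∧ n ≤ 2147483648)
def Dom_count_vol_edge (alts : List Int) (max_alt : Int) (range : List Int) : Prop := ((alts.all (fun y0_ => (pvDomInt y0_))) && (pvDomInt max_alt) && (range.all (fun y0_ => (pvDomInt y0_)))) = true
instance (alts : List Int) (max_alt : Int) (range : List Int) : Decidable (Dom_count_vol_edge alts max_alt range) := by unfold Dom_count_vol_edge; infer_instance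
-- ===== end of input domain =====

-- B replaces A's single stateful loop by a two-pass decomposition (values list +
-- seeded prefix-maximum table, then a separate summation pass); same cost, alternative structure.

-- ===== PORT A =====
-- literal port of A: one fold over the index list carrying (volume, max_alt);
-- alts[i] is PySem.List.pyGet? (none = IndexError, excluded by Pre_; the 'none' arm is unreachable there)
def count_vol_edge (alts : List Int) (max_alt : Int) (range : List Int) : Int :=
  (range.foldl (fun (st : Int × Int) i =>
      match PySem.List.pyGet? alts i with
      | some alt =>
        if alt < st.2 then (st.1 + (st.2 - alt), st.2)
        else if alt > st.2 then (st.1, alt)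
        else st
      | none => st) (0, max_alt)).1

-- ===== PORT B =====
-- literal port of Source B: values list, prefix-maximum table built by appending, then the filtered zip sum
def count_vol_edge_alt (alts : List Int) (max_alt : Int) (range : List Int) : Int :=
  let values := range.map (fun i => (PySem.List.pyGet? alts i).getD 0)
  let prefixes := (values.foldl (fun (st : List Int × Int) v =>
      (st.1 ++ [st.2], if st.2 ≥ v then st.2 else v)) (([] : List Int), max_alt)).1
  (values.zip prefixes).foldl (fun acc vp => if vp.1 < vp.2 then acc + (vp.2 - vp.1) else acc) 0

-- ===== PRECONDITION & SPEC =====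
-- Pre_ excludes exactly the inputs where Python A raises IndexError: every index in range must be a valid Python index into alts
def Pre_count_vol_edge (alts : List Int) (max_alt : Int) (range : List Int) : Prop :=
  ∀ i ∈ range, -(alts.length : Int) ≤ i ∧ i < alts.length
instance (alts : List Int) (max_alt : Int) (range : List Int) : Decidable (Pre_count_vol_edge alts max_alt range) := by unfold Pre_count_vol_edge; infer_instance
def pvWitness_count_vol_edge : List Int × Int × List Int := ([3, 1, 4, 1, 5], 2, [0, 1, 2, 3, 4])

def Spec_count_vol_edge (alts : List Int) (max_alt : Int) (range : List Int) (out : Int) : Prop := out = count_vol_edge_alt alts max_alt range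
instance (alts : List Int) (max_alt : Int) (range : List Int) (out : Int) : Decidable (Spec_count_vol_edge alts max_alt range out) := by unfold Spec_count_vol_edge; infer_instance

-- ===== CLAIM (what is proved, stated in full; the proofs are below) =====
def Claim_equal_count_vol_edge : Prop := ∀ (alts : List Int) (max_alt : Int) (range : List Int), Dom_count_vol_edge alts max_alt range → Pre_count_vol_edge alts max_alt range → Spec_count_vol_edge alts max_alt range (count_vol_edge alts max_alt range)

-- ===== LEMMAS AND PROOFS =====

-- recursive characterisation of the prefix-maximum table
def pvPref (vs : List Int) (m : Int) : List Int :=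
  match vs with
  | [] => []
  | v :: vs => m :: pvPref vs (if m ≥ v then m else v)

-- the reference value: per-element contribution with the running maximum
def pvG (vs : List Int) (m : Int) : Int :=
  match vs with
  | [] => 0
  | v :: vs => (if v < m then m - v else 0) + pvG vs (if m ≥ v then m else v)

theorem pvB_prefix (vs : List Int) (acc : List Int) (m : Int) :
    (vs.foldl (fun (st : List Int × Int) v =>
      (st.1 ++ [st.2], if st.2 ≥ v then st.2 else v)) (acc, m)).1
    = acc ++ pvPref vs m := by
  induction vs generalizing acc m with
  | nil => simp [pvPref]
  | cons v vs ih =>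
    simp only [List.foldl_cons, pvPref]
    rw [ih]
    simp

theorem pvB_sum (vs : List Int) (m s : Int) :
    (vs.zip (pvPref vs m)).foldl
      (fun acc vp => if vp.1 < vp.2 then acc + (vp.2 - vp.1) else acc) s
    = s + pvG vs m := by
  induction vs generalizing m s with
  | nil => simp [pvPref, pvG]
  | cons v vs ih =>
    simp only [pvPref, pvG, List.zip_cons_cons, List.foldl_cons]
    rw [ih]
    split_ifs <;> ring

theorem pvA_fold (alts : List Int) (range : List Int) (vol m : Int)
    (h : ∀ i ∈ range, -(alts.length : Int) ≤ i ∧ i < alts.length) :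
    (range.foldl (fun (st : Int × Int) i =>
      match PySem.List.pyGet? alts i with
      | some alt =>
        if alt < st.2 then (st.1 + (st.2 - alt), st.2)
        else if alt > st.2 then (st.1, alt)
        else st
      | none => st) (vol, m)).1
    = vol + pvG (range.map (fun i => (PySem.List.pyGet? alts i).getD 0)) m := by
  induction range generalizing vol m with
  | nil => simp [pvG]
  | cons i rest ih =>
    have hi := h i (List.mem_cons_self ..)
    have hrest : ∀ j ∈ rest, -(alts.length : Int) ≤ j ∧ j < alts.length :=
      fun j hj => h j (List.mem_cons_of_mem _ hj)
    have hsome : ∃ a, PySem.List.pyGet? alts i = some a := by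
      cases hg : PySem.List.pyGet? alts i with
      | some a => exact ⟨a, rfl⟩
      | none =>
        rw [PySem.List.pyGet?_eq_none_iff] at hg
        exact absurd (by constructor <;> omega : PySem.Raise.InRange alts.length i) hg
    obtain ⟨alt, halt⟩ := hsome
    simp only [List.foldl_cons, List.map_cons, halt, Option.getD_some, pvG]
    by_cases h1 : alt < m
    · rw [if_pos h1, ih _ _ hrest, if_pos h1, if_pos (le_of_lt h1)]; ring
    · rw [if_neg h1]
      by_cases h2 : alt > m
      · rw [if_pos h2, ih _ _ hrest, if_neg (by omega : ¬ alt < m), if_neg (by omega : ¬ m ≥ alt)]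
        ring
      · rw [if_neg h2, ih _ _ hrest, if_neg h1, if_pos (by omega : m ≥ alt)]
        ring

-- ===== VERDICT (by name: the statement is the Claim_ definition above) =====
theorem count_vol_edge_spec : Claim_equal_count_vol_edge := by
  intro alts max_alt range _ hpre
  unfold Spec_count_vol_edge count_vol_edge count_vol_edge_alt
  rw [pvA_fold alts range 0 max_alt hpre]
  simp only [pvB_prefix, List.nil_append, pvB_sum]
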